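-- pv_equiv track=rewrite | github.com/yunmuxize/Dryad_V2 | tofino/scripts/analysis/final_verification.py | range_to_lpm_count
-- ===== SOURCE A (Python) =====
-- def range_to_lpm_count(start, end, width):
--     if start > end: return 0
--     if start == 0 and end == (1 << width) - 1: return 1
--
--     count = 0
--     current = start
--     while current <= end:
--         best_k = 0
--         for k in range(width + 1):
--             block_size = 1 << k
--             if current % block_size == 0 and current + block_size - 1 <= end:
--                 best_k = k
--         block_size = 1 << best_k
--         count += 1
--         current += block_size
--     return count
-- ===== SOURCE B (Python) =====
-- def _tz(n):
--     """For n != 0: number of trailing zero bits (largest k with n % (1 << k) == 0)."""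
--     if n % 2 != 0:
--         return 0
--     return 1 + _tz(n // 2)
--
-- def _best_k(cur, end, width):
--     """Largest prefix length usable at cur, by bit arithmetic instead of a scan:
--     capped by width, by the remaining range length, and by cur's alignment."""
--     k = min(width, (end - cur + 1).bit_length() - 1)
--     if cur != 0:
--         k = min(k, _tz(cur))
--     if k < 0:
--         k = 0
--     return k
--
-- def range_to_lpm_count(start, end, width):
--     count = 0
--     cur = start
--     while cur <= end:
--         count += 1
--         cur += 1 << _best_k(cur, end, width)
--     return count
-- ===== Notes on version B (the rewrite author's own statement) =====
-- stated objective: alternative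
-- what changed: B computes each block's best prefix length directly by bit arithmetic (trailing-zero count of the current address and bit length of the remaining range, capped by width) instead of A's inner scan over all width+1 candidate prefix lengths, and drops A's two special-case guards, which the loop subsumes.
import Mathlib
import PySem

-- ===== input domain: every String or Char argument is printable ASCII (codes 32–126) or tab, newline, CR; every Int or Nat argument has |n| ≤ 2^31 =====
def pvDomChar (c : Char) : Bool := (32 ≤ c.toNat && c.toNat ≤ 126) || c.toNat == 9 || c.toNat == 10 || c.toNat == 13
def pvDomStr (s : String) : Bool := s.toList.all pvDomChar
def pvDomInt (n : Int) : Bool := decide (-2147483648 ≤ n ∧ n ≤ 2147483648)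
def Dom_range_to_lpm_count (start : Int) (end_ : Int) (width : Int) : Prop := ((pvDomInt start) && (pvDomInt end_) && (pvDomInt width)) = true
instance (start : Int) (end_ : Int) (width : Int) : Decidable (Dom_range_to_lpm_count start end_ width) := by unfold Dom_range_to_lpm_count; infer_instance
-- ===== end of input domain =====

-- B replaces A's inner scan over all prefix widths by a direct bit-arithmetic
-- computation of the best prefix length per emitted block (objective: alternative).

-- Python's '1 << e', ported by hand as 2 ^ e.toNat: exact whenever 0 ≤ e, which holds
-- at every shift both programs perform on inputs admitted by Pre_ below
def pvShl1 (e : Int) : Int := 2 ^ e.toNat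

-- ===== PORT A =====
-- inner 'for k in range(width + 1)' scan
def pvAInner (current : Int) (end_ : Int) (width : Int) : Int :=
  (PySem.List.pyRange 0 (width + 1) 1).foldl
    (fun best_k k =>
      if PySem.Int.mod current (pvShl1 k) = 0 ∧ current + pvShl1 k - 1 ≤ end_
      then k else best_k) 0

-- the 'while current <= end' loop of A
def pvALoop (end_ : Int) (width : Int) (current : Int) (count : Int) : Int :=
  if current ≤ end_ then
    pvALoop end_ width (current + pvShl1 (pvAInner current end_ width)) (count + 1)
  else count
termination_by (end_ + 1 - current).toNat
decreasing_by
  have h1 : (1 : Int) ≤ pvShl1 (pvAInner current end_ width) :=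
    one_le_pow₀ (by norm_num)
  omega

-- '(1 << width) - 1': Python raises ValueError here when width < 0; Pre_ excludes
-- exactly those inputs, so pvShl1 is exact wherever this branch is reached
def range_to_lpm_count (start : Int) (end_ : Int) (width : Int) : Int :=
  if start > end_ then 0
  else if start = 0 ∧ end_ = pvShl1 width - 1 then 1
  else pvALoop end_ width start 0

-- ===== PORT B =====
-- _tz from Source B; the 'n = 0' disjunct only makes the recursion total (Python's _tz
-- diverges at 0; B never calls it with 0)
def pvTz (n : Int) : Int :=
  if PySem.Int.mod n 2 ≠ 0 ∨ n = 0 then 0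
  else 1 + pvTz (PySem.Int.floordiv n 2)
termination_by n.natAbs
decreasing_by
  rename_i h
  push_neg at h
  obtain ⟨h2, h0⟩ := h
  obtain ⟨m, hm⟩ := (PySem.Int.mod_eq_zero_iff_dvd n 2).1 h2
  have hfd : PySem.Int.floordiv n 2 = m := by
    rw [PySem.Int.floordiv_eq_ediv_of_pos (by norm_num), hm]
    exact Int.mul_ediv_cancel_left m (by norm_num)
  rw [hfd]
  have : n.natAbs = 2 * m.natAbs := by rw [hm, Int.natAbs_mul]; rfl
  omega

-- _best_k from Source B
def pvBestK (cur : Int) (end_ : Int) (width : Int) : Int :=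
  let k1 := min width ((PySem.Int.bitLength (end_ - cur + 1) : Int) - 1)
  let k2 := if cur ≠ 0 then min k1 (pvTz cur) else k1
  if k2 < 0 then 0 else k2

-- the 'while cur <= end' loop of Source B
def pvBLoop (end_ : Int) (width : Int) (cur : Int) (count : Int) : Int :=
  if cur ≤ end_ then
    pvBLoop end_ width (cur + pvShl1 (pvBestK cur end_ width)) (count + 1)
  else count
termination_by (end_ + 1 - cur).toNat
decreasing_by
  have h1 : (1 : Int) ≤ pvShl1 (pvBestK cur end_ width) :=
    one_le_pow₀ (by norm_num)
  omega

def range_to_lpm_count_alt (start : Int) (end_ : Int) (width : Int) : Int :=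
  pvBLoop end_ width start 0

-- ===== PRECONDITION & SPEC =====
-- Pre_ excludes exactly the inputs where A raises: start = 0 ≤ end with width < 0,
-- where Python's '1 << width' raises ValueError.
def Pre_range_to_lpm_count (start : Int) (end_ : Int) (width : Int) : Prop :=
  ¬ (start = 0 ∧ 0 ≤ end_ ∧ width < 0)
instance (start : Int) (end_ : Int) (width : Int) : Decidable (Pre_range_to_lpm_count start end_ width) := by unfold Pre_range_to_lpm_count; infer_instance

def pvWitness_range_to_lpm_count : Int × Int × Int := (3, 12, 4)

def Spec_range_to_lpm_count (start : Int) (end_ : Int) (width : Int) (out : Int) : Prop := out = range_to_lpm_count_alt start end_ width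
instance (start : Int) (end_ : Int) (width : Int) (out : Int) : Decidable (Spec_range_to_lpm_count start end_ width out) := by unfold Spec_range_to_lpm_count; infer_instance

-- ===== CLAIM (what is proved, stated in full; the proofs are below) =====
def Claim_equal_range_to_lpm_count : Prop := ∀ (start : Int) (end_ : Int) (width : Int), Dom_range_to_lpm_count start end_ width → Pre_range_to_lpm_count start end_ width → Spec_range_to_lpm_count start end_ width (range_to_lpm_count start end_ width)

-- ===== LEMMAS AND PROOFS =====

-- trailing-zero specification of pvTz
theorem pvTz_spec_aux (N : Nat) : ∀ n : Int, n.natAbs ≤ N → n ≠ 0 →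
    0 ≤ pvTz n ∧ (2 : Int) ^ (pvTz n).toNat ∣ n ∧ ¬ (2 : Int) ^ ((pvTz n).toNat + 1) ∣ n := by
  induction N with
  | zero =>
      intro n h hn
      exact absurd (Int.natAbs_eq_zero.mp (Nat.le_zero.mp h)) hn
  | succ N ih =>
      intro n h hn
      rw [pvTz]
      by_cases hc : PySem.Int.mod n 2 ≠ 0 ∨ n = 0
      · rw [if_pos hc]
        have hmod : PySem.Int.mod n 2 ≠ 0 := by tauto
        refine ⟨le_refl 0, by simp, ?_⟩
        intro hdvd
        simp only [Int.toNat_zero, zero_add, pow_one] at hdvd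
        exact hmod ((PySem.Int.mod_eq_zero_iff_dvd n 2).2 hdvd)
      · rw [if_neg hc]
        push_neg at hc
        obtain ⟨h2, h0⟩ := hc
        obtain ⟨m, hm⟩ := (PySem.Int.mod_eq_zero_iff_dvd n 2).1 h2
        have hfd : PySem.Int.floordiv n 2 = m := by
          rw [PySem.Int.floordiv_eq_ediv_of_pos (by norm_num), hm]
          exact Int.mul_ediv_cancel_left m (by norm_num)
        have hm0 : m ≠ 0 := by rintro rfl; simp at hm; exact hn hm
        have habs : n.natAbs = 2 * m.natAbs := by rw [hm, Int.natAbs_mul]; rfl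
        have hmN : m.natAbs ≤ N := by omega
        obtain ⟨ih0, ihd, ihnd⟩ := ih m hmN hm0
        rw [hfd]
        have ht : (1 + pvTz m).toNat = (pvTz m).toNat + 1 := by omega
        rw [ht]
        refine ⟨by omega, ?_, ?_⟩
        · obtain ⟨c, hcc⟩ := ihd
          refine ⟨c, ?_⟩
          rw [hm]
          conv_lhs => rw [hcc]
          ring
        · intro hdvd
          apply ihnd
          obtain ⟨c, hcc⟩ := hdvd
          refine ⟨c, ?_⟩
          have h2m : (2 : Int) * m = 2 * (2 ^ ((pvTz m).toNat + 1) * c) := by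
            rw [← hm, hcc]; ring
          exact mul_left_cancel₀ (by norm_num) h2m

theorem pvTz_spec (n : Int) (hn : n ≠ 0) :
    0 ≤ pvTz n ∧ (2 : Int) ^ (pvTz n).toNat ∣ n ∧ ¬ (2 : Int) ^ ((pvTz n).toNat + 1) ∣ n :=
  pvTz_spec_aux n.natAbs n le_rfl hn

-- a fold that keeps the last element satisfying P, over a list none of whose elements satisfies P
theorem pv_foldl_no_sat (P : Int → Prop) [DecidablePred P] (l : List Int) (init : Int)
    (h : ∀ k ∈ l, ¬ P k) :
    l.foldl (fun b k => if P k then k else b) init = init := by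
  induction l generalizing init with
  | nil => rfl
  | cons a t ih =>
      simp only [List.foldl_cons]
      rw [if_neg (h a (by simp))]
      exact ih init (fun k hk => h k (by simp [hk]))

-- the scan over range(0, w+1) returns K when P holds exactly on 0..K
theorem pv_foldl_range (P : Int → Prop) [DecidablePred P] (w K : Int)
    (hK0 : 0 ≤ K) (hKw : K ≤ w)
    (hP : ∀ k, 0 ≤ k → k ≤ w → (P k ↔ k ≤ K)) :
    (PySem.List.pyRange 0 (w + 1) 1).foldl (fun b k => if P k then k else b) 0 = K := by
  rw [PySem.List.pyRange_one_append 0 (K + 1) (w + 1) (by omega) (by omega), List.foldl_append]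
  have h1 : (PySem.List.pyRange 0 (K + 1) 1).foldl (fun b k => if P k then k else b) 0 = K := by
    rw [PySem.List.pyRange_one_succ_right hK0, List.foldl_append]
    simp only [List.foldl_cons, List.foldl_nil]
    rw [if_pos ((hP K hK0 hKw).2 le_rfl)]
  rw [h1]
  apply pv_foldl_no_sat
  intro k hk hPk
  have hmem := PySem.List.mem_pyRange_one.1 hk
  have := (hP k (by omega) (by omega)).1 hPk
  omega

-- A's inner scan equals B's bit-arithmetic best_k
theorem pv_inner_eq (current end_ width : Int) (h : current ≤ end_) :
    pvAInner current end_ width = pvBestK current end_ width := by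
  unfold pvAInner
  by_cases hw : width < 0
  · -- empty scan on the A side; the clamp yields 0 on the B side
    rw [PySem.List.pyRange_one_eq_nil (by omega)]
    simp only [List.foldl_nil]
    unfold pvBestK
    dsimp only
    have h1 := min_le_left width ((PySem.Int.bitLength (end_ - current + 1) : Int) - 1)
    have h2 := min_le_left (min width ((PySem.Int.bitLength (end_ - current + 1) : Int) - 1)) (pvTz current)
    split_ifs <;> omega
  · push_neg at hw
    set len : Int := end_ - current + 1 with hlen_def
    have hlen : 1 ≤ len := by omega
    have hlen0 : len ≠ 0 := by omega
    set L : Nat := PySem.Int.bitLength len with hL_def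
    have hub : len.natAbs < 2 ^ L := PySem.Int.lt_two_pow_bitLength len
    have hlb : 2 ^ (L - 1) ≤ len.natAbs := PySem.Int.two_pow_bitLength_le len hlen0
    have habs : (len.natAbs : Int) = len := Int.natAbs_of_nonneg (by omega)
    have hL1 : 1 ≤ L := by
      by_contra hc
      have hL0 : L = 0 := by omega
      rw [hL0, pow_zero] at hub
      omega
    have hLi : (1 : Int) ≤ (L : Int) := by exact_mod_cast hL1
    -- the size condition of the scan is exactly k ≤ L - 1
    have hsize : ∀ k : Int, 0 ≤ k →
        (current + 2 ^ k.toNat - 1 ≤ end_ ↔ k ≤ (L : Int) - 1) := by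
      intro k hk
      constructor
      · intro hle
        have h2 : (2 : Int) ^ k.toNat ≤ len := by omega
        have hcast : ((2 : Nat) ^ k.toNat : Int) = (2 : Int) ^ k.toNat := by push_cast; ring
        have h3 : (2 : Nat) ^ k.toNat ≤ len.natAbs := by omega
        have h4 : (2 : Nat) ^ k.toNat < 2 ^ L := lt_of_le_of_lt h3 hub
        have h5 : k.toNat < L := (Nat.pow_lt_pow_iff_right (by norm_num)).1 h4
        omega
      · intro hle
        have h5 : k.toNat ≤ L - 1 := by omega
        have h3 : (2 : Nat) ^ k.toNat ≤ len.natAbs :=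
          le_trans (Nat.pow_le_pow_right (by norm_num) h5) hlb
        have hcast : ((2 : Nat) ^ k.toNat : Int) = (2 : Int) ^ k.toNat := by push_cast; ring
        omega
    by_cases hcur : current = 0
    · -- cur = 0: divisibility always holds, the scan returns min width (L - 1)
      have hK0 : (0 : Int) ≤ min width ((L : Int) - 1) := by omega
      have hP : ∀ k : Int, 0 ≤ k → k ≤ width →
          ((PySem.Int.mod current (pvShl1 k) = 0 ∧ current + pvShl1 k - 1 ≤ end_) ↔
            k ≤ min width ((L : Int) - 1)) := by
        intro k hk hkw
        unfold pvShl1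
        have hdvd : PySem.Int.mod current ((2 : Int) ^ k.toNat) = 0 := by
          rw [PySem.Int.mod_eq_zero_iff_dvd, hcur]; exact dvd_zero _
        simp only [hdvd, true_and]
        rw [hsize k hk]
        omega
      rw [pv_foldl_range _ width (min width ((L : Int) - 1)) hK0 (min_le_left _ _) hP]
      unfold pvBestK
      dsimp only
      rw [hcur]
      have hfold : end_ - 0 + 1 = len := by omega
      rw [hfold, ← hL_def, if_neg (show ¬ ((0 : Int) ≠ 0) by simp),
        if_neg (show ¬ (min width ((L : Int) - 1) < 0) by omega)]
    · -- cur ≠ 0: divisibility caps k at the trailing-zero count of cur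
      obtain ⟨ht0, htd, htnd⟩ := pvTz_spec current hcur
      set t : Int := pvTz current with ht_def
      have hdvd_iff : ∀ k : Int, 0 ≤ k →
          (PySem.Int.mod current ((2 : Int) ^ k.toNat) = 0 ↔ k ≤ t) := by
        intro k hk
        rw [PySem.Int.mod_eq_zero_iff_dvd]
        constructor
        · intro hd
          by_contra hgt
          push_neg at hgt
          exact htnd (dvd_trans (pow_dvd_pow 2 (by omega)) hd)
        · intro hle
          exact dvd_trans (pow_dvd_pow 2 (by omega : k.toNat ≤ t.toNat)) htd
      have hK0 : (0 : Int) ≤ min (min width ((L : Int) - 1)) t := by omega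
      have hP : ∀ k : Int, 0 ≤ k → k ≤ width →
          ((PySem.Int.mod current (pvShl1 k) = 0 ∧ current + pvShl1 k - 1 ≤ end_) ↔
            k ≤ min (min width ((L : Int) - 1)) t) := by
        intro k hk hkw
        unfold pvShl1
        rw [hdvd_iff k hk, hsize k hk]
        omega
      rw [pv_foldl_range _ width (min (min width ((L : Int) - 1)) t) hK0 (by omega) hP]
      unfold pvBestK
      dsimp only
      have hfold : end_ - current + 1 = len := by omega
      rw [hfold, ← hL_def, ← ht_def, if_pos hcur,
        if_neg (show ¬ (min (min width ((L : Int) - 1)) t < 0) by omega)]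

-- the two loops agree
theorem pv_loop_eq (n : Nat) : ∀ (end_ width current count : Int),
    (end_ + 1 - current).toNat ≤ n →
    pvALoop end_ width current count = pvBLoop end_ width current count := by
  induction n with
  | zero =>
      intro end_ width current count hle
      rw [pvALoop, pvBLoop]
      have hc : ¬ current ≤ end_ := by omega
      rw [if_neg hc, if_neg hc]
  | succ n ih =>
      intro end_ width current count hle
      rw [pvALoop, pvBLoop]
      by_cases hc : current ≤ end_
      · rw [if_pos hc, if_pos hc, pv_inner_eq current end_ width hc]
        apply ih
        have h1 : (1 : Int) ≤ pvShl1 (pvBestK current end_ width) :=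
          one_le_pow₀ (by norm_num)
        omega
      · rw [if_neg hc, if_neg hc]

theorem pv_bitLength_two_pow (w : Nat) : PySem.Int.bitLength ((2 : Int) ^ w) = w + 1 := by
  have hne : ((2 : Int) ^ w) ≠ 0 := by positivity
  have hub := PySem.Int.lt_two_pow_bitLength ((2 : Int) ^ w)
  have hlb := PySem.Int.two_pow_bitLength_le ((2 : Int) ^ w) hne
  have habs : ((2 : Int) ^ w).natAbs = 2 ^ w := by
    rw [Int.natAbs_pow]; rfl
  rw [habs] at hub hlb
  set L := PySem.Int.bitLength ((2 : Int) ^ w) with hL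
  have h1 : w < L := (Nat.pow_lt_pow_iff_right (by norm_num)).1 hub
  have h2 : L - 1 ≤ w := (Nat.pow_le_pow_iff_right (by norm_num)).1 hlb
  omega

-- ===== VERDICT (by name: the statement is the Claim_ definition above) =====
theorem range_to_lpm_count_spec : Claim_equal_range_to_lpm_count := by
  intro start end_ width _hdom hpre
  unfold Spec_range_to_lpm_count range_to_lpm_count range_to_lpm_count_alt
  by_cases h1 : start > end_
  · rw [if_pos h1, pvBLoop, if_neg (by omega)]
  · rw [if_neg h1]
    by_cases h2 : start = 0 ∧ end_ = pvShl1 width - 1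
    · rw [if_pos h2]
      obtain ⟨hs0, he⟩ := h2
      unfold pvShl1 at he
      have hend0 : 0 ≤ end_ := by
        have : (1 : Int) ≤ 2 ^ width.toNat := one_le_pow₀ (by norm_num)
        omega
      have hwnn : 0 ≤ width := by
        unfold Pre_range_to_lpm_count at hpre
        by_contra hlt
        exact hpre ⟨hs0, hend0, by omega⟩
      -- B's loop takes exactly one block of size 2 ^ width over the full range
      have hbk : pvBestK start end_ width = width := by
        unfold pvBestK
        have hlen : end_ - start + 1 = (2 : Int) ^ width.toNat := by omega
        rw [hlen]
        have hbl : PySem.Int.bitLength ((2 : Int) ^ width.toNat) = width.toNat + 1 :=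
          pv_bitLength_two_pow width.toNat
        rw [hbl]
        have hmin : min width ((((width.toNat + 1 : Nat)) : Int) - 1) = width := by
          have : (((width.toNat + 1 : Nat)) : Int) = width + 1 := by omega
          rw [this]; omega
        rw [hs0]
        simp only [ne_eq, not_true_eq_false, if_false]
        rw [hmin, if_neg (by omega)]
      have hstop : ¬ (start + pvShl1 width ≤ end_) := by
        unfold pvShl1
        omega
      rw [pvBLoop, if_pos (by omega), hbk, pvBLoop, if_neg hstop]
      omega
    · rw [if_neg h2]
      exact pv_loop_eq (end_ + 1 - start).toNat end_ width start 0 le_rfl
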